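-- pv_equiv track=rewrite | github.com/GarimaChaubey/DSA | 2978-check-if-strings-can-be-made-equal-with-operations-ii/check-if-strings-can-be-made-equal-with-operations-ii.py | checkStrings
-- ===== SOURCE A (Python) =====
-- def checkStrings(s1, s2):
--
--     n = len(s1)
--
--     even1, odd1 = [], []
--     even2, odd2 = [], []
--
--     for i in range(n):
--         if i % 2 == 0:
--             even1.append(s1[i])
--             even2.append(s2[i])
--         else:
--             odd1.append(s1[i])
--             odd2.append(s2[i])
--
--     return sorted(even1) == sorted(even2) and sorted(odd1) == sorted(odd2)
-- ===== SOURCE B (Python) =====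
-- def checkStrings(s1, s2):
--     bal = {}
--     for i in range(len(s1)):
--         p = i % 2
--         k1 = (p, s1[i])
--         bal[k1] = bal.get(k1, 0) + 1
--         k2 = (p, s2[i])
--         bal[k2] = bal.get(k2, 0) - 1
--     return all(v == 0 for v in bal.values())
-- ===== Notes on version B (the rewrite author's own statement) =====
-- stated objective: alternative
-- what changed: Replaces building four parity-split lists and comparing two sorted copies with a single pass maintaining one signed balance dict keyed by (i%2, char), returning whether all balances are zero.
import Mathlib
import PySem

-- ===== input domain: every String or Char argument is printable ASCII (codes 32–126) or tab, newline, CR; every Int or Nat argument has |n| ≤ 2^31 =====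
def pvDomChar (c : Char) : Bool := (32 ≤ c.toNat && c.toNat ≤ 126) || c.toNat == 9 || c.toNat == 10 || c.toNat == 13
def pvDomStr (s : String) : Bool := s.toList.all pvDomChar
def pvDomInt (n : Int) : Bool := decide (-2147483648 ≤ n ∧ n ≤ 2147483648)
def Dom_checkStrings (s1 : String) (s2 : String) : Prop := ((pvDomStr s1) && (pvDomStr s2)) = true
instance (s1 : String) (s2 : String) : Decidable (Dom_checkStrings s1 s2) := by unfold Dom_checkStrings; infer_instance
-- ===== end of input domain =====

-- B replaces A's four parity-split lists + two sorted-list comparisons by one pass over the indices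
-- maintaining a single signed balance dict keyed by (i % 2, char); equal multisets per parity ⟺ all balances zero.

-- ===== PORT A =====
def checkStrings (s1 : String) (s2 : String) : Bool :=
  let l1 := s1.toList
  let l2 := s2.toList
  let n : Int := (l1.length : Int)
  let st := (PySem.List.pyRange 0 n).foldl
    (fun (st : List Char × List Char × List Char × List Char) i =>
      if PySem.Int.mod i 2 == 0 then
        (st.1 ++ [PySem.List.pyGetD l1 i ' '], st.2.1,
         st.2.2.1 ++ [PySem.List.pyGetD l2 i ' '], st.2.2.2)
      else
        (st.1, st.2.1 ++ [PySem.List.pyGetD l1 i ' '],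
         st.2.2.1, st.2.2.2 ++ [PySem.List.pyGetD l2 i ' ']))
    ([], [], [], [])
  decide (PySem.List.sorted st.1 (fun c => c) false = PySem.List.sorted st.2.2.1 (fun c => c) false)
    && decide (PySem.List.sorted st.2.1 (fun c => c) false = PySem.List.sorted st.2.2.2 (fun c => c) false)

-- ===== PORT B =====
def checkStrings_alt (s1 : String) (s2 : String) : Bool :=
  let l1 := s1.toList
  let l2 := s2.toList
  let n : Int := (l1.length : Int)
  let bal := (PySem.List.pyRange 0 n).foldl
    (fun (bal : PySem.Dict (Int × Char) Int) i =>
      let p := PySem.Int.mod i 2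
      let bal := bal.modify (p, PySem.List.pyGetD l1 i ' ') 0 (· + 1)
      bal.modify (p, PySem.List.pyGetD l2 i ' ') 0 (· - 1))
    PySem.Dict.empty
  bal.values.all (fun v => v == 0)

-- ===== PRECONDITION & SPEC =====
-- Pre_ excludes exactly the inputs with len(s2) < len(s1), on which Python A raises IndexError at s2[i].
def Pre_checkStrings (s1 : String) (s2 : String) : Prop := s1.toList.length ≤ s2.toList.length
instance (s1 : String) (s2 : String) : Decidable (Pre_checkStrings s1 s2) := by unfold Pre_checkStrings; infer_instance
def pvWitness_checkStrings : String × String := ("abcd", "cdab")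

def Spec_checkStrings (s1 : String) (s2 : String) (out : Bool) : Prop := out = checkStrings_alt s1 s2
instance (s1 : String) (s2 : String) (out : Bool) : Decidable (Spec_checkStrings s1 s2 out) := by unfold Spec_checkStrings; infer_instance

-- ===== CLAIM (what is proved, stated in full; the proofs are below) =====
def Claim_equal_checkStrings : Prop := ∀ (s1 : String) (s2 : String), Dom_checkStrings s1 s2 → Pre_checkStrings s1 s2 → Spec_checkStrings s1 s2 (checkStrings s1 s2)

-- ===== LEMMAS AND PROOFS =====

-- the (parity, char) tag of position i of list l
def pvTag (l : List Char) (i : Nat) : Int × Char := (((i % 2 : Nat) : Int), l.getD i ' ')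

-- A's loop body, on Nat indices
def pvStepA (l1 l2 : List Char) (st : List Char × List Char × List Char × List Char) (i : Nat) :
    List Char × List Char × List Char × List Char :=
  if i % 2 = 0 then
    (st.1 ++ [l1.getD i ' '], st.2.1, st.2.2.1 ++ [l2.getD i ' '], st.2.2.2)
  else
    (st.1, st.2.1 ++ [l1.getD i ' '], st.2.2.1, st.2.2.2 ++ [l2.getD i ' '])

-- B's loop body, on Nat indices
def pvStepB (l1 l2 : List Char) (d : PySem.Dict (Int × Char) Int) (i : Nat) : PySem.Dict (Int × Char) Int :=
  (d.modify (pvTag l1 i) 0 (· + 1)).modify (pvTag l2 i) 0 (· - 1)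

-- parity-selected characters of l over the index list L
def pvSel (p : Nat) (l : List Char) (L : List Nat) : List Char :=
  (L.filter (fun i => i % 2 == p)).map (fun i => l.getD i ' ')

lemma pvLoopA (l1 l2 : List Char) (L : List Nat) (e1 o1 e2 o2 : List Char) :
    L.foldl (pvStepA l1 l2) (e1, o1, e2, o2) =
      (e1 ++ pvSel 0 l1 L, o1 ++ pvSel 1 l1 L, e2 ++ pvSel 0 l2 L, o2 ++ pvSel 1 l2 L) := by
  induction L generalizing e1 o1 e2 o2 with
  | nil => simp [pvSel]
  | cons i t ih =>
    simp only [List.foldl_cons, pvStepA, pvSel, List.filter_cons]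
    by_cases h : i % 2 = 0
    · simp [h, ih, pvSel]
    · have h1 : i % 2 = 1 := by omega
      simp [h1, ih, pvSel]

lemma pvLoopB_getD (l1 l2 : List Char) (L : List Nat) (d : PySem.Dict (Int × Char) Int) (k : Int × Char) :
    (L.foldl (pvStepB l1 l2) d).getD k 0 =
      d.getD k 0 + ((L.map (pvTag l1)).count k : Int) - ((L.map (pvTag l2)).count k : Int) := by
  induction L generalizing d with
  | nil => simp
  | cons i t ih =>
    simp only [List.foldl_cons, List.map_cons, List.count_cons, ih, pvStepB,
      PySem.Dict.getD_modify]
    split_ifs with h1 h2 h2 <;> push_cast <;> simp_all <;> ring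

lemma pvLoopB_mem_keys (l1 l2 : List Char) (L : List Nat) (d : PySem.Dict (Int × Char) Int) (k : Int × Char) :
    k ∈ (L.foldl (pvStepB l1 l2) d).keys ↔ k ∈ d.keys ∨ k ∈ L.map (pvTag l1) ∨ k ∈ L.map (pvTag l2) := by
  induction L generalizing d with
  | nil => simp
  | cons i t ih =>
    simp only [List.foldl_cons, List.map_cons, List.mem_cons, ih, pvStepB,
      PySem.Dict.keys_modify, PySem.Dict.mem_keys_insert]
    tauto

lemma pvLoopB_nodup (l1 l2 : List Char) (L : List Nat) (d : PySem.Dict (Int × Char) Int)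
    (h : d.keys.Nodup) : (L.foldl (pvStepB l1 l2) d).keys.Nodup := by
  induction L generalizing d with
  | nil => simpa
  | cons i t ih =>
    refine ih _ ?_
    have h1 : ((d.modify (pvTag l1 i) 0 (· + 1)).keys).Nodup := by
      rw [PySem.Dict.keys_modify]; exact PySem.Dict.nodup_keys_insert _ _ _ h
    rw [pvStepB, PySem.Dict.keys_modify]
    exact PySem.Dict.nodup_keys_insert _ _ _ h1

-- counting a tag equals counting the char among the matching-parity selections
lemma pvCount_tag (l : List Char) (L : List Nat) (p : Nat) (c : Char) :
    (L.map (pvTag l)).count ((p : Int), c) = (pvSel p l L).count c := by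
  simp only [pvSel, List.count_eq_countP, List.countP_map, List.countP_filter]
  apply List.countP_congr
  intro i _
  have hpm : ((i % 2 : Nat) : Int) = (p : Int) ↔ i % 2 = p := by omega
  simp only [Function.comp, pvTag, Prod.mk.injEq, Bool.and_eq_true, beq_iff_eq, hpm]
  exact and_comm

lemma pvCount_tag_junk (l : List Char) (L : List Nat) (p : Int) (h0 : p ≠ 0) (h1 : p ≠ 1) (c : Char) :
    (L.map (pvTag l)).count (p, c) = 0 := by
  simp only [List.count_eq_countP, List.countP_map]
  rw [List.countP_eq_zero]
  intro i _
  simp only [Function.comp, pvTag, beq_iff_eq, Prod.mk.injEq, not_and]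
  intro hp
  exfalso
  omega

-- the multiset bridge: all balances zero ↔ per-parity permutations
lemma pvBridge (l1 l2 : List Char) (L : List Nat) :
    (∀ k : Int × Char, ((L.map (pvTag l1)).count k : Int) = (L.map (pvTag l2)).count k) ↔
      ((pvSel 0 l1 L).Perm (pvSel 0 l2 L) ∧ (pvSel 1 l1 L).Perm (pvSel 1 l2 L)) := by
  constructor
  · intro h
    constructor <;> rw [List.perm_iff_count] <;> intro c
    · have a1 := pvCount_tag l1 L 0 c
      have a2 := pvCount_tag l2 L 0 c
      push_cast at a1 a2
      have := h ((0 : Int), c)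
      rw [a1, a2] at this
      exact_mod_cast this
    · have a1 := pvCount_tag l1 L 1 c
      have a2 := pvCount_tag l2 L 1 c
      push_cast at a1 a2
      have := h ((1 : Int), c)
      rw [a1, a2] at this
      exact_mod_cast this
  · rintro ⟨h0, h1⟩ ⟨p, c⟩
    by_cases hp0 : p = 0
    · subst hp0
      have a1 := pvCount_tag l1 L 0 c
      have a2 := pvCount_tag l2 L 0 c
      push_cast at a1 a2
      rw [a1, a2, List.perm_iff_count] at *
      exact_mod_cast h0 c
    · by_cases hp1 : p = 1
      · subst hp1
        have a1 := pvCount_tag l1 L 1 c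
        have a2 := pvCount_tag l2 L 1 c
        push_cast at a1 a2
        rw [a1, a2, List.perm_iff_count] at *
        exact_mod_cast h1 c
      · rw [pvCount_tag_junk l1 L p hp0 hp1, pvCount_tag_junk l2 L p hp0 hp1]

-- B returns true iff all tag counts agree
lemma pvAlt_iff (s1 s2 : String) :
    checkStrings_alt s1 s2 = true ↔
      (∀ k : Int × Char, (((List.range s1.toList.length).map (pvTag s1.toList)).count k : Int) =
        ((List.range s1.toList.length).map (pvTag s2.toList)).count k) := by
  unfold checkStrings_alt
  dsimp only
  rw [PySem.List.pyRange_zero_natCast, List.foldl_map]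
  rw [PySem.List.foldl_congr_mem _ _ (pvStepB s1.toList s2.toList) _ ?hstep]
  case hstep =>
    intro d i _
    have hm : PySem.Int.mod (↑i) 2 = ((i % 2 : Nat) : Int) := by
      exact_mod_cast PySem.Int.mod_natCast i 2
    simp only [pvStepB, pvTag, PySem.List.pyGetD_natCast, hm]
  have hnd : ((List.range s1.toList.length).foldl (pvStepB s1.toList s2.toList) PySem.Dict.empty).keys.Nodup :=
    pvLoopB_nodup _ _ _ _ (by simp [PySem.Dict.keys_empty])
  have hgd : ∀ k : Int × Char,
      ((List.range s1.toList.length).foldl (pvStepB s1.toList s2.toList) PySem.Dict.empty).getD k 0 =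
      (((List.range s1.toList.length).map (pvTag s1.toList)).count k : Int) -
        ((List.range s1.toList.length).map (pvTag s2.toList)).count k := by
    intro k
    simpa [PySem.Dict.getD_empty] using
      pvLoopB_getD s1.toList s2.toList (List.range s1.toList.length) PySem.Dict.empty k
  rw [List.all_eq_true,
    PySem.Dict.values_eq_map_keys _ hnd 0]
  constructor
  · intro h k
    by_cases hk : k ∈ ((List.range s1.toList.length).foldl (pvStepB s1.toList s2.toList) PySem.Dict.empty).keys
    · have hv := h _ (List.mem_map_of_mem hk)
      rw [beq_iff_eq, hgd k] at hv
      omega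
    · rw [pvLoopB_mem_keys] at hk
      simp only [PySem.Dict.keys_empty, List.not_mem_nil, false_or, not_or] at hk
      rw [List.count_eq_zero.2 hk.1, List.count_eq_zero.2 hk.2]
  · intro h v hv
    rcases List.mem_map.1 hv with ⟨k, _, rfl⟩
    rw [beq_iff_eq, hgd k, h k]
    ring

lemma pvA_iff (s1 s2 : String) :
    checkStrings s1 s2 = true ↔
      ((pvSel 0 s1.toList (List.range s1.toList.length)).Perm (pvSel 0 s2.toList (List.range s1.toList.length)) ∧
       (pvSel 1 s1.toList (List.range s1.toList.length)).Perm (pvSel 1 s2.toList (List.range s1.toList.length))) := by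
  unfold checkStrings
  dsimp only
  rw [PySem.List.pyRange_zero_natCast, List.foldl_map]
  rw [PySem.List.foldl_congr_mem _ _ (pvStepA s1.toList s2.toList) _ ?hstep]
  case hstep =>
    intro st i _
    have hm : PySem.Int.mod (↑i) 2 = ((i % 2 : Nat) : Int) := by
      exact_mod_cast PySem.Int.mod_natCast i 2
    simp only [PySem.List.pyGetD_natCast, hm, pvStepA]
    by_cases h : i % 2 = 0 <;> simp [h] <;> omega
  rw [pvLoopA]
  simp only [List.nil_append, Bool.and_eq_true, decide_eq_true_eq,
    PySem.List.sorted_id_eq_sorted_id_iff_perm]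

-- ===== VERDICT (by name: the statement is the Claim_ definition above) =====
theorem checkStrings_spec : Claim_equal_checkStrings := by
  intro s1 s2 _ _
  unfold Spec_checkStrings
  have h := (pvA_iff s1 s2).trans ((pvBridge s1.toList s2.toList (List.range s1.toList.length)).symm.trans (pvAlt_iff s1 s2).symm)
  by_cases hA : checkStrings s1 s2 = true
  · rw [hA, (h.mp hA).symm]
  · have : ¬ checkStrings_alt s1 s2 = true := fun hb => hA (h.mpr hb)
    simp only [Bool.not_eq_true] at hA this
    rw [hA, this]
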